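-- pv_equiv track=rewrite | github.com/openharmonyinsight/openharmony-skills | skills/openharmony-ci/scripts/openharmony_ci.py | choose_log_candidate
-- ===== SOURCE A (Python) =====
-- from typing import Any, Dict, List, Optional, Sequence, Tuple
--
-- def choose_log_candidate(files: List[Dict[str, str]]) -> Optional[Dict[str, str]]:
--     priorities = (
--         "error.log",
--         "build.log.zip",
--         "build.log",
--     )
--     lowered = [(item, item["name"].lower()) for item in files]
--     for priority in priorities:
--         for item, name in lowered:
--             if name.endswith(priority):
--                 return item
--     return files[0] if files else None
-- ===== SOURCE B (Python) =====
-- from typing import Dict, List, Optional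
--
--
-- def choose_log_candidate(files: List[Dict[str, str]]) -> Optional[Dict[str, str]]:
--     suffixes = ("error.log", "build.log.zip", "build.log")
--     best = None
--     best_rank = 3
--     for item in files:
--         name = item["name"].lower()
--         rank = next((i for i, s in enumerate(suffixes) if name.endswith(s)), 3)
--         if rank < best_rank:
--             best, best_rank = item, rank
--     if best is not None:
--         return best
--     return files[0] if files else None
-- ===== Notes on version B (the rewrite author's own statement) =====
-- stated objective: alternative
-- what changed: Replaces the priority-major double scan (one pass over all files per suffix) by a single pass over files that keeps the earliest file with the smallest suffix rank seen so far.
-- outside the precondition, e.g. on choose_log_candidate([{}]): A raises KeyError, B raises KeyError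
import Mathlib
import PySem

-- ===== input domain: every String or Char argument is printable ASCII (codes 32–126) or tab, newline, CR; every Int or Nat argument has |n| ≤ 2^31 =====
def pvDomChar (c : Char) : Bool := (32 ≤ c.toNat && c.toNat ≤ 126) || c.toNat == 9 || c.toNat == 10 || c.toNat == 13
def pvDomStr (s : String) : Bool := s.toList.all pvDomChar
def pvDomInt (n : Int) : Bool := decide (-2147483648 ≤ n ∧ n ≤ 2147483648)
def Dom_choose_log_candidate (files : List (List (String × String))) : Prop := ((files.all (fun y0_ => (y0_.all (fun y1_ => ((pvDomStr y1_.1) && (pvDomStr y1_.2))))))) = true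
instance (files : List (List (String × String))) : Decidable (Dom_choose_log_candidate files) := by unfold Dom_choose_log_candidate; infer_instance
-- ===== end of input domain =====

-- One honest line: B makes a single pass over files keeping the earliest file with the
-- smallest suffix-priority rank, instead of A's one full scan per priority (alternative).

-- ===== PORT A =====
-- item["name"].lower(); the .getD "" default is unreachable inside Pre_ (the key is present)
def pvLowName (f : List (String × String)) : String :=
  PySem.Str.lower ((f.lookup "name").getD "")

def choose_log_candidate (files : List (List (String × String))) : Option (List (String × String)) :=
  let lowered := files.map (fun item => (item, pvLowName item))
  -- 'for priority in priorities: for item, name in lowered: if name.endswith(priority): return item'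
  match lowered.find? (fun p => PySem.Str.endswith p.2 "error.log") with
  | some p => some p.1
  | none =>
    match lowered.find? (fun p => PySem.Str.endswith p.2 "build.log.zip") with
    | some p => some p.1
    | none =>
      match lowered.find? (fun p => PySem.Str.endswith p.2 "build.log") with
      | some p => some p.1
      | none => files.head?   -- 'files[0] if files else None'

-- ===== PORT B =====
-- item["name"].lower() (B computes it itself, independently of A's helper)
def pvLowNameAlt (f : List (String × String)) : String :=
  PySem.Str.lower ((f.lookup "name").getD "")

-- rank = index of the first suffix name endswith, else 3
def pvRank (f : List (String × String)) : Nat :=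
  if PySem.Str.endswith (pvLowNameAlt f) "error.log" then 0
  else if PySem.Str.endswith (pvLowNameAlt f) "build.log.zip" then 1
  else if PySem.Str.endswith (pvLowNameAlt f) "build.log" then 2
  else 3

def pvStep (st : Option (List (String × String)) × Nat) (f : List (String × String)) :
    Option (List (String × String)) × Nat :=
  if pvRank f < st.2 then (some f, pvRank f) else st

def choose_log_candidate_alt (files : List (List (String × String))) : Option (List (String × String)) :=
  match (files.foldl pvStep (none, 3)).1 with
  | some b => some b
  | none => files.head?

-- ===== PRECONDITION & SPEC =====
-- Pre_ excludes only inputs where A raises KeyError: some file without a "name" key.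
def Pre_choose_log_candidate (files : List (List (String × String))) : Prop :=
  (files.all (fun f => (f.lookup "name").isSome)) = true
instance (files : List (List (String × String))) : Decidable (Pre_choose_log_candidate files) := by
  unfold Pre_choose_log_candidate; infer_instance
def pvWitness_choose_log_candidate : (List (List (String × String))) :=
  [[("name", "a.txt")], [("name", "BUILD.log")]]

def Spec_choose_log_candidate (files : List (List (String × String))) (out : Option (List (String × String))) : Prop := out = choose_log_candidate_alt files
instance (files : List (List (String × String))) (out : Option (List (String × String))) : Decidable (Spec_choose_log_candidate files out) := by unfold Spec_choose_log_candidate; infer_instance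

-- ===== CLAIM (what is proved, stated in full; the proofs are below) =====
def Claim_equal_choose_log_candidate : Prop := ∀ (files : List (List (String × String))), Dom_choose_log_candidate files → Pre_choose_log_candidate files → Spec_choose_log_candidate files (choose_log_candidate files)

-- ===== LEMMAS AND PROOFS =====

theorem pv_find?_congr {α : Type} {l : List α} {p q : α → Bool}
    (h : ∀ x ∈ l, p x = q x) : l.find? p = l.find? q := by
  induction l with
  | nil => rfl
  | cons a t ih =>
    simp only [List.find?]
    rw [h a (by simp)]
    cases q a
    · exact ih (fun x hx => h x (by simp [hx]))
    · rfl

theorem pv_rank0 (f : List (String × String)) :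
    (pvRank f == 0) = PySem.Str.endswith (pvLowName f) "error.log" := by
  unfold pvRank pvLowNameAlt; unfold pvLowName; split_ifs <;> simp_all

theorem pv_rank1 (f : List (String × String)) :
    (pvRank f == 1) = (!PySem.Str.endswith (pvLowName f) "error.log"
      && PySem.Str.endswith (pvLowName f) "build.log.zip") := by
  unfold pvRank pvLowNameAlt; unfold pvLowName; split_ifs <;> simp_all

theorem pv_rank2 (f : List (String × String)) :
    (pvRank f == 2) = (!PySem.Str.endswith (pvLowName f) "error.log"
      && (!PySem.Str.endswith (pvLowName f) "build.log.zip"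
      && PySem.Str.endswith (pvLowName f) "build.log")) := by
  unfold pvRank pvLowNameAlt; unfold pvLowName; split_ifs <;> simp_all

theorem pv_fold0 (fs : List (List (String × String)))
    (st : Option (List (String × String))) :
    fs.foldl pvStep (st, 0) = (st, 0) := by
  induction fs with
  | nil => rfl
  | cons f t ih => simpa [pvStep] using ih

theorem pv_fold1 (fs : List (List (String × String)))
    (st : Option (List (String × String))) :
    fs.foldl pvStep (st, 1) =
      match fs.find? (fun f => pvRank f == 0) with
      | some x => (some x, 0)
      | none => (st, 1) := by
  induction fs generalizing st with
  | nil => rfl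
  | cons f t ih =>
    simp only [List.foldl_cons, List.find?]
    by_cases h : pvRank f = 0
    · simp [pvStep, h, pv_fold0]
    · have h1 : ¬ pvRank f < 1 := by omega
      have hb : (pvRank f == 0) = false := by simp [h]
      simp [pvStep, h1, hb, ih]

theorem pv_fold2 (fs : List (List (String × String)))
    (st : Option (List (String × String))) :
    fs.foldl pvStep (st, 2) =
      match fs.find? (fun f => pvRank f == 0) with
      | some x => (some x, 0)
      | none =>
        match fs.find? (fun f => pvRank f == 1) with
        | some x => (some x, 1)
        | none => (st, 2) := by
  induction fs generalizing st with
  | nil => rfl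
  | cons f t ih =>
    simp only [List.foldl_cons, List.find?]
    by_cases h0 : pvRank f = 0
    · simp [pvStep, h0, pv_fold0]
    · by_cases h1 : pvRank f = 1
      · simp [pvStep, h1, pv_fold1]
      · have hn : ¬ pvRank f < 2 := by omega
        have hb0 : (pvRank f == 0) = false := by simp [h0]
        have hb1 : (pvRank f == 1) = false := by simp [h1]
        simp [pvStep, hn, hb0, hb1, ih]

theorem pv_fold3 (fs : List (List (String × String)))
    (st : Option (List (String × String))) :
    fs.foldl pvStep (st, 3) =
      match fs.find? (fun f => pvRank f == 0) with
      | some x => (some x, 0)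
      | none =>
        match fs.find? (fun f => pvRank f == 1) with
        | some x => (some x, 1)
        | none =>
          match fs.find? (fun f => pvRank f == 2) with
          | some x => (some x, 2)
          | none => (st, 3) := by
  induction fs generalizing st with
  | nil => rfl
  | cons f t ih =>
    simp only [List.foldl_cons, List.find?]
    by_cases h0 : pvRank f = 0
    · simp [pvStep, h0, pv_fold0]
    · by_cases h1 : pvRank f = 1
      · simp [pvStep, h1, pv_fold1]
      · by_cases h2 : pvRank f = 2
        · simp [pvStep, h2, pv_fold2]
        · have hn : ¬ pvRank f < 3 := by omega
          have hb0 : (pvRank f == 0) = false := by simp [h0]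
          have hb1 : (pvRank f == 1) = false := by simp [h1]
          have hb2 : (pvRank f == 2) = false := by simp [h2]
          simp [pvStep, hn, hb0, hb1, hb2, ih]

-- ===== VERDICT (by name: the statement is the Claim_ definition above) =====
theorem choose_log_candidate_spec : Claim_equal_choose_log_candidate := by
  intro files _ _
  unfold Spec_choose_log_candidate choose_log_candidate choose_log_candidate_alt
  rw [pv_fold3]
  simp only [List.find?_map, Function.comp_def]
  have e0 : files.find? (fun f => pvRank f == 0)
      = files.find? (fun item => PySem.Str.endswith (pvLowName item) "error.log") :=
    pv_find?_congr (fun x _ => pv_rank0 x)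
  rw [← e0]
  cases hf0 : files.find? (fun f => pvRank f == 0) with
  | some x => simp only [Option.map_some]
  | none =>
    simp only [Option.map_none]
    have h0 : ∀ x ∈ files, PySem.Str.endswith (pvLowName x) "error.log" = false := by
      intro x hx
      have := List.find?_eq_none.mp hf0 _ hx
      rw [pv_rank0] at this
      simpa using this
    have e1 : files.find? (fun f => pvRank f == 1)
        = files.find? (fun item => PySem.Str.endswith (pvLowName item) "build.log.zip") := by
      apply pv_find?_congr
      intro x hx
      rw [pv_rank1, h0 x hx]
      rfl
    rw [← e1]
    cases hf1 : files.find? (fun f => pvRank f == 1) with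
    | some x => simp only [Option.map_some]
    | none =>
      simp only [Option.map_none]
      have h1 : ∀ x ∈ files, PySem.Str.endswith (pvLowName x) "build.log.zip" = false := by
        intro x hx
        have := List.find?_eq_none.mp hf1 _ hx
        rw [pv_rank1, h0 x hx] at this
        simpa using this
      have e2 : files.find? (fun f => pvRank f == 2)
          = files.find? (fun item => PySem.Str.endswith (pvLowName item) "build.log") := by
        apply pv_find?_congr
        intro x hx
        rw [pv_rank2, h0 x hx, h1 x hx]
        rfl
      rw [← e2]
      cases hf2 : files.find? (fun f => pvRank f == 2) with
      | some x => simp only [Option.map_some]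
      | none => simp only [Option.map_none]
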